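-- pv_equiv track=rewrite | github.com/Komdix/bekap_wins | bakap_nadruhu/kodikovanie/old/1st_block/02/p1_digit_sum.py | power_digit_sum
-- ===== SOURCE A (Python) =====
-- def power_digit_sum(number):
--     n = number
--     count = 0
--     converted = 0
--     kek = 0
--     while n > 0:
--         count += 1
--         n //= 7
--
--     for i in range(count, 0, -1):
--         kek = number % 7
--         converted += kek ** i
--         number //= 7
--     return converted
-- ===== SOURCE B (Python) =====
-- def power_digit_sum(number):
--     if number <= 0:
--         return 0
--     p = 1
--     while p * 7 <= number:
--         p *= 7
--     total = 0
--     e = 1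
--     while p > 0:
--         d, number = divmod(number, p)
--         total += d ** e
--         e += 1
--         p //= 7
--     return total
-- ===== Notes on version B (the rewrite author's own statement) =====
-- stated objective: alternative
-- what changed: B extracts base-7 digits most-significant-first by first growing the largest power of 7 not exceeding the number and then repeatedly divmod-ing by shrinking powers with ascending exponents 1,2,..., instead of A's least-significant-first mod-7/div-7 rescan with descending exponents after a separate counting pass.
import Mathlib
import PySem

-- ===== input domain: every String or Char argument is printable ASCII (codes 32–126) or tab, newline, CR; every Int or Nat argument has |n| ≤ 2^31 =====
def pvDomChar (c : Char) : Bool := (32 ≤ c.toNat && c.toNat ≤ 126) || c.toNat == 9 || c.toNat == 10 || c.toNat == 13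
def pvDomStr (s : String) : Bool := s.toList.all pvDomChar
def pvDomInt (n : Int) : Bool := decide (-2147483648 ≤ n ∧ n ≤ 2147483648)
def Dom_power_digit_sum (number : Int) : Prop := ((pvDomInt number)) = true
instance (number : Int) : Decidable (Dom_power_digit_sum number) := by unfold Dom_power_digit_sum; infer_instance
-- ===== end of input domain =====

-- B finds the largest power of 7 ≤ number and extracts digits most-significant-first by divmod
-- with ascending exponents, instead of A's two LSB-first mod/div passes; objective: alternative.


-- ===== PORT A =====
-- while n > 0: count += 1; n //= 7
def pvCount (n : Int) (count : Int) : Int :=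
  if h : n > 0 then pvCount (PySem.Int.floordiv n 7) (count + 1) else count
termination_by n.toNat
decreasing_by
  rw [PySem.Int.floordiv_eq_ediv_of_pos (by norm_num)]
  omega

-- 'kek ** i' ported as 'kek ^ i.toNat': exact, since every i drawn from range(count, 0, -1) satisfies i ≥ 1
def power_digit_sum (number : Int) : Int :=
  let count := pvCount number 0
  ((PySem.List.pyRange count 0 (-1)).foldl
    (fun (st : Int × Int) i =>
      let kek := PySem.Int.mod st.2 7
      (st.1 + kek ^ i.toNat, PySem.Int.floordiv st.2 7))
    (0, number)).1

-- ===== PORT B =====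
-- while p * 7 <= number: p *= 7   (the '0 < p' conjunct only makes the recursion total;
-- B always calls this with p = 1 > 0 and p stays positive, so behaviour is identical)
def pvFindPow (number p : Int) : Int :=
  if h : 0 < p ∧ p * 7 ≤ number then pvFindPow number (p * 7) else p
termination_by (number - p).toNat
decreasing_by omega

-- while p > 0: d, number = divmod(number, p); total += d ** e; e += 1; p //= 7
-- 'd ** e' ported as 'd ^ e.toNat': exact, since e starts at 1 and only increases
def pvLoopB (n p e total : Int) : Int :=
  if _h : 0 < p then
    pvLoopB (PySem.Int.mod n p) (PySem.Int.floordiv p 7) (e + 1)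
      (total + (PySem.Int.floordiv n p) ^ e.toNat)
  else total
termination_by p.toNat
decreasing_by
  rw [PySem.Int.floordiv_eq_ediv_of_pos (by norm_num)]
  omega

def power_digit_sum_alt (number : Int) : Int :=
  if number ≤ 0 then 0
  else pvLoopB number (pvFindPow number 1) 1 0

-- ===== PRECONDITION & SPEC =====
def Spec_power_digit_sum (number : Int) (out : Int) : Prop := out = power_digit_sum_alt number
instance (number : Int) (out : Int) : Decidable (Spec_power_digit_sum number out) := by unfold Spec_power_digit_sum; infer_instance

-- ===== CLAIM (what is proved, stated in full; the proofs are below) =====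
def Claim_equal_power_digit_sum : Prop := ∀ (number : Int), Dom_power_digit_sum number → Spec_power_digit_sum number (power_digit_sum number)

-- ===== LEMMAS AND PROOFS =====

-- the base-7 digit list of n, least significant first (proof device shared by both sides)
def pvDigits (n : Int) : List Int :=
  if _h : n > 0 then PySem.Int.mod n 7 :: pvDigits (PySem.Int.floordiv n 7) else []
termination_by n.toNat
decreasing_by
  rw [PySem.Int.floordiv_eq_ediv_of_pos (by norm_num)]
  omega

-- the common value both programs compute: sum of d^(k-i) over the enumerated digit list
def pvSpecSum (n : Int) : Int :=
  ((PySem.List.enumerate (pvDigits n) 0).map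
    (fun p => p.2 ^ ((((pvDigits n).length : Int) - p.1).toNat))).sum

theorem pvCount_eq (n : Int) (c : Int) : pvCount n c = c + ((pvDigits n).length : Int) := by
  by_cases h : n > 0
  · rw [pvCount, pvDigits]
    simp only [h, dite_true]
    rw [pvCount_eq (PySem.Int.floordiv n 7) (c + 1)]
    simp
    ring
  · rw [pvCount, pvDigits]
    simp [h]
termination_by n.toNat
decreasing_by
  rw [PySem.Int.floordiv_eq_ediv_of_pos (by norm_num)]
  omega

theorem pv_enum_shift {α : Type} (ds : List α) (s : Int) (f : Int → α → Int) :
    ((PySem.List.enumerate ds s).map (fun p => f p.1 p.2))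
      = ((PySem.List.enumerate ds 0).map (fun p => f (p.1 + s) p.2)) := by
  induction ds generalizing s f with
  | nil => simp [PySem.List.enumerate_nil]
  | cons d ds ih =>
    simp only [PySem.List.enumerate_cons, List.map_cons, zero_add]
    rw [ih (s + 1) f, ih 1 (fun i x => f (i + s) x)]
    congr 1
    apply List.map_congr_left
    intro p _
    congr 1
    ring

theorem pv_fold_eq (m acc : Int) :
    ((PySem.List.pyRange ((pvDigits m).length : Int) 0 (-1)).foldl
      (fun (st : Int × Int) i =>
        (st.1 + (PySem.Int.mod st.2 7) ^ i.toNat, PySem.Int.floordiv st.2 7))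
      (acc, m)).1
    = acc + ((PySem.List.enumerate (pvDigits m) 0).map
        (fun p => p.2 ^ ((((pvDigits m).length : Int) - p.1).toNat))).sum := by
  by_cases h : m > 0
  · rw [pvDigits]
    simp only [h, dite_true]
    have hlen : (0 : Int) < ((PySem.Int.mod m 7 :: pvDigits (PySem.Int.floordiv m 7)).length : Int) := by
      exact_mod_cast Nat.succ_pos _
    rw [PySem.List.pyRange_neg_one_cons hlen, List.foldl_cons]
    have hl : ((PySem.Int.mod m 7 :: pvDigits (PySem.Int.floordiv m 7)).length : Int) - 1
        = ((pvDigits (PySem.Int.floordiv m 7)).length : Int) := by simp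
    simp only [hl]
    rw [pv_fold_eq (PySem.Int.floordiv m 7)
        (acc + (PySem.Int.mod m 7) ^ (((PySem.Int.mod m 7 :: pvDigits (PySem.Int.floordiv m 7)).length : Int)).toNat)]
    rw [PySem.List.enumerate_cons]
    simp only [List.map_cons, List.sum_cons, zero_add]
    rw [pv_enum_shift (pvDigits (PySem.Int.floordiv m 7)) 1
        (fun i x => x ^ ((((PySem.Int.mod m 7 :: pvDigits (PySem.Int.floordiv m 7)).length : Int)) - i).toNat)]
    have hlen2 : ∀ (p : Int × Int), p ∈ PySem.List.enumerate (pvDigits (PySem.Int.floordiv m 7)) 0 →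
        p.2 ^ ((((PySem.Int.mod m 7 :: pvDigits (PySem.Int.floordiv m 7)).length : Int)) - (p.1 + 1)).toNat
          = p.2 ^ ((((pvDigits (PySem.Int.floordiv m 7)).length : Int)) - p.1).toNat := by
      intro p _
      congr 1
      simp only [List.length_cons]
      push_cast
      omega
    rw [List.map_congr_left hlen2]
    have h0 : ((((PySem.Int.mod m 7 :: pvDigits (PySem.Int.floordiv m 7)).length : Int)) - 0)
        = (((PySem.Int.mod m 7 :: pvDigits (PySem.Int.floordiv m 7)).length : Int)) := by ring
    rw [h0]
    ring
  · rw [pvDigits]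
    simp [h, PySem.List.pyRange_neg_one_eq_nil (by simp : (0:Int) ≤ 0)]
termination_by m.toNat
decreasing_by
  rw [PySem.Int.floordiv_eq_ediv_of_pos (by norm_num)]
  omega

theorem pvA_eq (n : Int) : power_digit_sum n = pvSpecSum n := by
  unfold power_digit_sum pvSpecSum
  simp only []
  rw [pvCount_eq n 0]
  simpa using pv_fold_eq n 0

-- ===== B side =====

-- the MSB-first partial sum B's second loop computes for p = 7^j
def pvMsSum : Nat → Int → Int → Int
  | 0, n, e => n ^ e.toNat
  | (j+1), n, e =>
      (PySem.Int.floordiv n (7 ^ (j+1))) ^ e.toNat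
        + pvMsSum j (PySem.Int.mod n (7 ^ (j+1))) (e + 1)

-- n's low m digits, least significant first, padded with zeros to length m
def pvPad : Nat → Int → List Int
  | 0, _ => []
  | (m+1), n => PySem.Int.mod n 7 :: pvPad m (PySem.Int.floordiv n 7)

theorem pvLoopB_eq (j : Nat) (n e total : Int) :
    pvLoopB n ((7:Int) ^ j) e total = total + pvMsSum j n e := by
  induction j generalizing n e total with
  | zero =>
    rw [pvLoopB]
    simp only [pow_zero, dite_true, show ((0:Int) < 1) from by norm_num]
    rw [pvLoopB]
    simp [pvMsSum]
  | succ j ih =>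
    rw [pvLoopB]
    have hp : (0:Int) < 7 ^ (j+1) := by positivity
    simp only [hp, dite_true]
    have hdiv : PySem.Int.floordiv ((7:Int) ^ (j+1)) 7 = 7 ^ j := by
      rw [PySem.Int.floordiv_eq_ediv_of_pos (by norm_num), pow_succ]
      exact Int.mul_ediv_cancel _ (by norm_num)
    rw [hdiv, ih]
    simp [pvMsSum]
    ring

theorem pvPad_length (m : Nat) (n : Int) : (pvPad m n).length = m := by
  induction m generalizing n with
  | zero => rfl
  | succ m ih => simp [pvPad, ih]

theorem pv_enum_append_singleton {α : Type} (xs : List α) (y : α) (s : Int) :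
    PySem.List.enumerate (xs ++ [y]) s
      = PySem.List.enumerate xs s ++ [(s + (xs.length : Int), y)] := by
  induction xs generalizing s with
  | nil => simp [PySem.List.enumerate_cons, PySem.List.enumerate_nil]
  | cons x xs ih =>
    simp only [List.cons_append, PySem.List.enumerate_cons, ih (s+1), List.length_cons]
    congr 2
    push_cast
    ring

-- peeling the top digit off the padded list
theorem pvPad_top (m : Nat) (n : Int) (h0 : 0 ≤ n) (h1 : n < 7 ^ (m+1)) :
    pvPad (m+1) n
      = pvPad m (PySem.Int.mod n (7 ^ m)) ++ [PySem.Int.floordiv n (7 ^ m)] := by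
  induction m generalizing n with
  | zero =>
    have h1' : n < 7 := by simpa using h1
    simp only [pvPad, List.nil_append]
    rw [PySem.Int.mod_eq_emod_of_pos (by norm_num),
        PySem.Int.floordiv_eq_ediv_of_pos (by norm_num)]
    rw [Int.emod_eq_of_lt h0 h1']
    norm_num
  | succ m ih =>
    have h7 : (0:Int) < 7 := by norm_num
    have hpm : (0:Int) < 7 ^ (m+1) := by positivity
    have hq : PySem.Int.floordiv n 7 < 7 ^ (m+1) := by
      rw [PySem.Int.floordiv_eq_ediv_of_pos h7]
      have : n < 7 ^ (m+1) * 7 := by rw [← pow_succ]; exact h1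
      omega
    have hq0 : 0 ≤ PySem.Int.floordiv n 7 := by
      rw [PySem.Int.floordiv_eq_ediv_of_pos h7]; positivity
    have l1 : pvPad (m+1+1) n
        = PySem.Int.mod n 7 :: pvPad (m+1) (PySem.Int.floordiv n 7) := rfl
    have l2 : pvPad (m+1) (PySem.Int.mod n (7 ^ (m+1)))
        = PySem.Int.mod (PySem.Int.mod n (7 ^ (m+1))) 7
            :: pvPad m (PySem.Int.floordiv (PySem.Int.mod n (7 ^ (m+1))) 7) := rfl
    have e1 : PySem.Int.mod (PySem.Int.mod n (7 ^ (m+1))) 7 = PySem.Int.mod n 7 := by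
      rw [PySem.Int.mod_eq_emod_of_pos h7, PySem.Int.mod_eq_emod_of_pos h7,
          PySem.Int.mod_eq_emod_of_pos hpm]
      exact Int.emod_emod_of_dvd n (dvd_pow_self 7 (Nat.succ_ne_zero m))
    have e2 : PySem.Int.floordiv (PySem.Int.mod n (7 ^ (m+1))) 7
        = PySem.Int.mod (PySem.Int.floordiv n 7) (7 ^ m) := by
      rw [PySem.Int.mod_eq_emod_of_pos hpm, PySem.Int.mod_eq_emod_of_pos (by positivity),
          PySem.Int.floordiv_eq_ediv_of_pos h7, PySem.Int.floordiv_eq_ediv_of_pos h7]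
      rw [Int.emod_def, Int.emod_def]
      have h3 : n - 7 ^ (m+1) * (n / 7 ^ (m+1)) = n + (-(7 ^ m * (n / 7 ^ (m+1)))) * 7 := by
        rw [pow_succ]; ring
      rw [h3, Int.add_mul_ediv_right _ _ (by norm_num : (7:Int) ≠ 0)]
      have hdd : n / 7 / 7 ^ m = n / 7 ^ (m+1) := by
        rw [pow_succ']
        exact Int.ediv_ediv_of_nonneg (by norm_num)
      rw [← hdd]; ring
    have e3 : PySem.Int.floordiv (PySem.Int.floordiv n 7) (7 ^ m)
        = PySem.Int.floordiv n (7 ^ (m+1)) := by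
      rw [PySem.Int.floordiv_eq_ediv_of_pos (by positivity),
          PySem.Int.floordiv_eq_ediv_of_pos h7, PySem.Int.floordiv_eq_ediv_of_pos hpm,
          pow_succ']
      exact Int.ediv_ediv_of_nonneg (by norm_num)
    rw [l1, l2, ih (PySem.Int.floordiv n 7) hq0 hq, e1, e2, e3]
    simp

theorem pvMsSum_eq (j : Nat) (n e : Int) (h0 : 0 ≤ n) (h1 : n < 7 ^ (j+1)) :
    pvMsSum j n e
      = ((PySem.List.enumerate (pvPad (j+1) n) 0).map
          (fun q => q.2 ^ ((e + (j:Int) - q.1).toNat))).sum := by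
  induction j generalizing n e with
  | zero =>
    have h7 : (0:Int) < 7 := by norm_num
    simp only [pvMsSum, pvPad, PySem.List.enumerate_cons, PySem.List.enumerate_nil]
    rw [PySem.Int.mod_eq_emod_of_pos h7]
    rw [Int.emod_eq_of_lt h0 (by simpa using h1)]
    simp
  | succ j ih =>
    have hpm : (0:Int) < 7 ^ (j+1) := by positivity
    have hr0 : 0 ≤ PySem.Int.mod n (7 ^ (j+1)) := PySem.Int.mod_nonneg _ hpm
    have hr1 : PySem.Int.mod n (7 ^ (j+1)) < 7 ^ (j+1) := PySem.Int.mod_lt _ hpm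
    rw [show pvMsSum (j+1) n e
        = (PySem.Int.floordiv n (7 ^ (j+1))) ^ e.toNat
            + pvMsSum j (PySem.Int.mod n (7 ^ (j+1))) (e + 1) from rfl]
    rw [ih _ (e+1) hr0 hr1]
    rw [pvPad_top (j+1) n h0 h1, pv_enum_append_singleton]
    simp only [List.map_append, List.sum_append, List.map_cons, List.map_nil,
      List.sum_cons, List.sum_nil, pvPad_length, zero_add, add_zero]
    have hmap : ∀ (q : Int × Int),
        q ∈ PySem.List.enumerate (pvPad (j+1) (PySem.Int.mod n (7 ^ (j+1)))) 0 →
        q.2 ^ ((e + 1 + (j:Int) - q.1).toNat)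
          = q.2 ^ ((e + ((j+1 : Nat) : Int) - q.1).toNat) := by
      intro q _
      congr 1
      push_cast
      omega
    rw [List.map_congr_left hmap]
    have etop : (e + (((j:Nat)+1 : Nat) : Int) - (((j:Nat)+1 : Nat) : Int)).toNat = e.toNat := by
      omega
    rw [etop]
    ring

-- the digit list of a positive n, padded to its own length, is itself
theorem pvPad_digits (n : Int) : pvPad (pvDigits n).length n = pvDigits n := by
  by_cases h : n > 0
  · rw [pvDigits]
    simp only [h, dite_true, List.length_cons, pvPad]
    rw [pvPad_digits (PySem.Int.floordiv n 7)]
  · rw [pvDigits]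
    simp [h, pvPad]
termination_by n.toNat
decreasing_by
  rw [PySem.Int.floordiv_eq_ediv_of_pos (by norm_num)]
  omega

-- k digits means 7^(k-1) ≤ n < 7^k
theorem pvDigits_bounds (n : Int) (h : 0 < n) :
    7 ^ ((pvDigits n).length - 1) ≤ n ∧ n < 7 ^ (pvDigits n).length := by
  rw [pvDigits]
  simp only [h, dite_true, List.length_cons]
  have h7 : (0:Int) < 7 := by norm_num
  have hmod := PySem.Int.mod_nonneg n h7
  have hmod2 := PySem.Int.mod_lt n h7
  have hdm := PySem.Int.floordiv_mul_add_mod n 7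
  by_cases h' : 0 < PySem.Int.floordiv n 7
  · obtain ⟨hlo, hhi⟩ := pvDigits_bounds (PySem.Int.floordiv n 7) h'
    have hl1 : 1 ≤ (pvDigits (PySem.Int.floordiv n 7)).length := by
      rw [pvDigits, dif_pos h']; simp
    constructor
    · have : (7:Int) ^ ((pvDigits (PySem.Int.floordiv n 7)).length - 1) * 7
          ≤ PySem.Int.floordiv n 7 * 7 := by nlinarith
      calc (7:Int) ^ ((pvDigits (PySem.Int.floordiv n 7)).length + 1 - 1)
          = 7 ^ ((pvDigits (PySem.Int.floordiv n 7)).length - 1) * 7 := by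
            rw [← pow_succ]; congr 1; omega
        _ ≤ PySem.Int.floordiv n 7 * 7 := this
        _ ≤ n := by omega
    · have : PySem.Int.floordiv n 7 * 7 ≤ (7 ^ (pvDigits (PySem.Int.floordiv n 7)).length - 1) * 7 := by
        nlinarith
      have hn : n < 7 ^ (pvDigits (PySem.Int.floordiv n 7)).length * 7 := by omega
      rw [pow_succ]
      exact hn
  · have hz : pvDigits (PySem.Int.floordiv n 7) = [] := by rw [pvDigits, dif_neg h']
    have hfd : PySem.Int.floordiv n 7 = 0 := by
      rw [PySem.Int.floordiv_eq_ediv_of_pos h7] at *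
      omega
    rw [hz, hfd] at *
    simp only [List.length_nil]
    constructor
    · simpa using h
    · simp only [zero_add, pow_one]
      omega
termination_by n.toNat
decreasing_by
  rw [PySem.Int.floordiv_eq_ediv_of_pos (by norm_num)]
  omega

theorem pvFindPow_aux (d : Nat) : ∀ (j : Nat) (n : Int), (7:Int) ^ j ≤ n → n < 7 ^ (j + d + 1) →
    ∃ m : Nat, pvFindPow n ((7:Int) ^ j) = 7 ^ m ∧ (7:Int) ^ m ≤ n ∧ n < 7 ^ (m+1) := by
  induction d with
  | zero =>
    intro j n hlo hhi
    refine ⟨j, ?_, hlo, by simpa using hhi⟩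
    have : ¬ ((0:Int) < 7 ^ j ∧ 7 ^ j * 7 ≤ n) := by
      rintro ⟨-, hc⟩
      rw [← pow_succ] at hc
      simp only [Nat.add_zero] at hhi
      omega
    rw [pvFindPow, dif_neg this]
  | succ d ih =>
    intro j n hlo hhi
    by_cases hc : (7:Int) ^ j * 7 ≤ n
    · have hg : (0:Int) < 7 ^ j ∧ 7 ^ j * 7 ≤ n := ⟨by positivity, hc⟩
      rw [pvFindPow, dif_pos hg, ← pow_succ]
      exact ih (j+1) n (by rw [pow_succ]; exact hc) (by
        have : j + 1 + d + 1 = j + (d + 1) + 1 := by omega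
        rw [this]; exact hhi)
    · have hn : ¬ ((0:Int) < 7 ^ j ∧ 7 ^ j * 7 ≤ n) := by rintro ⟨-, h⟩; exact hc h
      rw [pvFindPow, dif_neg hn]
      exact ⟨j, rfl, hlo, by rw [pow_succ]; omega⟩

theorem pvB_eq (n : Int) : power_digit_sum_alt n = pvSpecSum n := by
  unfold power_digit_sum_alt
  by_cases h : n ≤ 0
  · simp only [h, if_true]
    unfold pvSpecSum
    rw [pvDigits]
    simp [show ¬ n > 0 by omega, PySem.List.enumerate_nil]
  · simp only [h, if_false]
    have hpos : 0 < n := by omega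
    obtain ⟨hlo, hhi⟩ := pvDigits_bounds n hpos
    have hk1 : 1 ≤ (pvDigits n).length := by rw [pvDigits]; simp [hpos]
    set k := (pvDigits n).length with hk
    -- the power-growing loop finds 7^(k-1)
    have hfind : pvFindPow n 1 = (7:Int) ^ (k - 1) := by
      obtain ⟨m, hfp, hm1, hm2⟩ := pvFindPow_aux (k - 1) 0 n (by simpa using hpos)
        (by
          have : 0 + (k - 1) + 1 = k := by omega
          rw [this]; exact hhi)
      have hmk : m = k - 1 := by
        by_contra hne
        rcases Nat.lt_or_ge m (k-1) with h1 | h1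
        · have : (7:Int) ^ (m+1) ≤ 7 ^ (k-1) :=
            pow_le_pow_right₀ (by norm_num) (by omega)
          linarith
        · have h2 : k ≤ m := by omega
          have : (7:Int) ^ k ≤ 7 ^ m := pow_le_pow_right₀ (by norm_num) h2
          linarith
      rw [pow_zero] at hfp
      rw [hfp, hmk]
    rw [hfind, pvLoopB_eq (k-1) n 1 0, zero_add]
    rw [pvMsSum_eq (k-1) n 1 (by omega) (by
      have : k - 1 + 1 = k := by omega
      rw [this]; exact hhi)]
    have hk' : k - 1 + 1 = k := by omega
    rw [hk']
    unfold pvSpecSum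
    rw [pvPad_digits n]
    apply congrArg
    apply List.map_congr_left
    intro q _
    congr 1
    rw [← hk]
    omega

-- ===== VERDICT (by name: the statement is the Claim_ definition above) =====
theorem power_digit_sum_spec : Claim_equal_power_digit_sum := by
  intro number _
  unfold Spec_power_digit_sum
  rw [pvA_eq, pvB_eq]
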